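-- pv_equiv track=rewrite | github.com/CrowdTruth/Events-in-Text | Code/Metrics.py | get_sentences_in_common
-- ===== SOURCE A (Python) =====
-- def get_sentences_in_common(worker_dict):
--     #sentences_in_common_dict = {worker: {worker2 : [[sentenceannotation_worker1], [sentenceannotation_worker2]]}}
--     sentences_in_common_dict = {}
--     for worker in worker_dict:
--         #print worker, sentencestoworker[worker]
--         sentences = worker_dict[worker]
--         for worker2 in worker_dict:
--             if not worker == worker2:
--                 worker2annotations = []
--                 worker1annotations = []
--                 sentences2 = worker_dict[worker2]
--                 for sentence in sentences:
--                     if sentence in sentences2: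
--                         worker1annotations.append(worker_dict[worker][sentence])
--                         worker2annotations.append(worker_dict[worker2][sentence])
--                 if len(worker1annotations) > 0:
--                     if worker in sentences_in_common_dict:
--                         other_worker_sentences_in_common = sentences_in_common_dict[worker]
--                     else:
--                         other_worker_sentences_in_common = {}
--                     sentences_in_common = [worker1annotations, worker2annotations]
--                     other_worker_sentences_in_common[worker2] = sentences_in_common
--                     sentences_in_common_dict[worker] = other_worker_sentences_in_common
--     return sentences_in_common_dict
-- ===== SOURCE B (Python) =====
-- def get_sentences_in_common(worker_dict):
--     # Inverted index: sentence -> [(worker, annotation)] in worker order,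
--     # so each worker only meets co-occurring workers instead of scanning all pairs.
--     index = {}
--     for worker, sentences in worker_dict.items():
--         for sentence, ann in sentences.items():
--             index.setdefault(sentence, []).append((worker, ann))
--     result = {}
--     for w1, s1 in worker_dict.items():
--         pair_lists = {}
--         for sentence, v1 in s1.items():
--             for w2, v2 in index[sentence]:
--                 if w2 != w1:
--                     pair_lists.setdefault(w2, []).append((v1, v2))
--         if pair_lists:
--             result[w1] = {w2: [[a for a, _ in pair_lists[w2]], [b for _, b in pair_lists[w2]]]
--                           for w2 in worker_dict if w2 in pair_lists}
--     return result
-- ===== Notes on version B (the rewrite author's own statement) =====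
-- stated objective: faster
-- what changed: Replaces A's all-pairs scan (for every ordered worker pair, re-scan the first worker's sentences against the second) by an inverted index sentence->(worker,annotation) built once, so each worker collects annotation pairs only from workers that actually co-occur on a sentence, then emits partners in dict order.
import Mathlib
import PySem

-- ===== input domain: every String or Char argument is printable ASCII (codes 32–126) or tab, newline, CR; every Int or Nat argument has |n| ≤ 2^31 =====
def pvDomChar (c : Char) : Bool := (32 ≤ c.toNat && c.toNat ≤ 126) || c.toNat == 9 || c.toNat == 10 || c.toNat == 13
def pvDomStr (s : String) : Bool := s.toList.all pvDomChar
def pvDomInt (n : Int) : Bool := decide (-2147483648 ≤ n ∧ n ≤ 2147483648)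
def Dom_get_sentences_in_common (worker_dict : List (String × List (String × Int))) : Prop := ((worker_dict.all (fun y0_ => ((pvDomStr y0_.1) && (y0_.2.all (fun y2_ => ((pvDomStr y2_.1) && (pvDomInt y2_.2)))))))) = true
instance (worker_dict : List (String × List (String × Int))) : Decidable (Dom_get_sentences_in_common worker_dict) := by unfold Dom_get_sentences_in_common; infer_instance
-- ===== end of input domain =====

-- B replaces A's all-pairs scan by an inverted index sentence → (worker, annotation),
-- so annotation pairs are collected only for workers that actually share a sentence.

-- ===== PORT A =====
def get_sentences_in_common (worker_dict : List (String × List (String × Int))) : List (String × List (String × List (List Int))) :=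
  let wd : PySem.Dict String (List (String × Int)) := PySem.Dict.mk worker_dict
  let sicd : PySem.Dict String (PySem.Dict String (List (List Int))) :=
    worker_dict.foldl (fun sicd e1 =>
      let worker := e1.1
      let sentences : PySem.Dict String Int := PySem.Dict.mk (wd.getD worker [])
      worker_dict.foldl (fun sicd e2 =>
        let worker2 := e2.1
        if ¬ (worker == worker2) then
          let sentences2 : PySem.Dict String Int := PySem.Dict.mk (wd.getD worker2 [])
          let anns : List Int × List Int :=
            sentences.items.foldl (fun p se =>
              if sentences2.contains se.1 then
                (p.1 ++ [(PySem.Dict.mk (wd.getD worker [])).getD se.1 0],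
                 p.2 ++ [(PySem.Dict.mk (wd.getD worker2 [])).getD se.1 0])
              else p) ([], [])
          if anns.1.length > 0 then
            let owsic : PySem.Dict String (List (List Int)) :=
              if sicd.contains worker then sicd.getD worker PySem.Dict.empty else PySem.Dict.empty
            sicd.insert worker (owsic.insert worker2 [anns.1, anns.2])
          else sicd
        else sicd) sicd) PySem.Dict.empty
  sicd.items.map (fun q => (q.1, q.2.items))

-- ===== PORT B =====
def get_sentences_in_common_alt (worker_dict : List (String × List (String × Int))) : List (String × List (String × List (List Int))) :=
  let index : PySem.Dict String (List (String × Int)) :=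
    worker_dict.foldl (fun idx e =>
      e.2.foldl (fun idx se => idx.modify se.1 [] (· ++ [(e.1, se.2)])) idx) PySem.Dict.empty
  let result : PySem.Dict String (List (String × List (List Int))) :=
    worker_dict.foldl (fun res e1 =>
      let w1 := e1.1
      let pair_lists : PySem.Dict String (List (Int × Int)) :=
        e1.2.foldl (fun pl se =>
          (index.getD se.1 []).foldl (fun pl wv =>
            if wv.1 == w1 then pl else pl.modify wv.1 [] (· ++ [(se.2, wv.2)])) pl)
          PySem.Dict.empty
      if pair_lists.items.isEmpty then res
      else res.insert w1
        ((worker_dict.filter (fun e2 => pair_lists.contains e2.1)).map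
          (fun e2 => (e2.1, [(pair_lists.getD e2.1 []).map (·.1),
                             (pair_lists.getD e2.1 []).map (·.2)])))) PySem.Dict.empty
  result.items

-- ===== PRECONDITION & SPEC =====
-- Pre_ excludes association lists with duplicate worker keys or duplicate sentence keys:
-- such lists do not represent any Python dict, so A's behaviour there is not defined by the source.
def Pre_get_sentences_in_common (worker_dict : List (String × List (String × Int))) : Prop :=
  (worker_dict.map Prod.fst).Nodup ∧ ∀ e ∈ worker_dict, (e.2.map Prod.fst).Nodup
instance (worker_dict : List (String × List (String × Int))) : Decidable (Pre_get_sentences_in_common worker_dict) := by unfold Pre_get_sentences_in_common; infer_instance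
def pvWitness_get_sentences_in_common : (List (String × List (String × Int))) :=
  [("a", [("s", 1), ("t", 2)]), ("b", [("s", 5)]), ("c", [])]
def Spec_get_sentences_in_common (worker_dict : List (String × List (String × Int))) (out : List (String × List (String × List (List Int)))) : Prop := out = get_sentences_in_common_alt worker_dict
instance (worker_dict : List (String × List (String × Int))) (out : List (String × List (String × List (List Int)))) : Decidable (Spec_get_sentences_in_common worker_dict out) := by unfold Spec_get_sentences_in_common; infer_instance

-- ===== CLAIM (what is proved, stated in full; the proofs are below) =====
def Claim_equal_get_sentences_in_common : Prop := ∀ (worker_dict : List (String × List (String × Int))), Dom_get_sentences_in_common worker_dict → Pre_get_sentences_in_common worker_dict → Spec_get_sentences_in_common worker_dict (get_sentences_in_common worker_dict)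

-- ===== LEMMAS AND PROOFS =====
-- Both ports are reduced to one canonical description pvOutL: for each worker (in input
-- order) with at least one co-occurring partner, the partners in input order with the
-- paired annotation lists over the shared sentences in the first worker's order.

abbrev pvE : Type := String × List (String × Int)
abbrev pvInnerD : Type := PySem.Dict String (List (List Int))
abbrev pvOuterD : Type := PySem.Dict String pvInnerD

def pvCommon (s1 s2 : List (String × Int)) : List (String × Int) :=
  s1.filter (fun se => (PySem.Dict.mk s2).contains se.1)

def pvPair (s1 s2 : List (String × Int)) : List (List Int) :=
  [(pvCommon s1 s2).map (·.2), (pvCommon s1 s2).map (fun se => (PySem.Dict.mk s2).getD se.1 0)]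

def pvKeep (e1 e2 : pvE) : Bool := !(e1.1 == e2.1) && !(pvCommon e1.2 e2.2).isEmpty

def pvInner (wd : List pvE) (e1 : pvE) : List (String × List (List Int)) :=
  (wd.filter (pvKeep e1)).map (fun e2 => (e2.1, pvPair e1.2 e2.2))

def pvOutL (wd l : List pvE) : List (String × List (String × List (List Int))) :=
  (l.filter (fun e1 => !(pvInner wd e1).isEmpty)).map (fun e1 => (e1.1, pvInner wd e1))

theorem pvContains_mk {ν : Type} (ps : List (String × ν)) (k : String) :
    ((PySem.Dict.mk ps).contains k = true) ↔ k ∈ ps.map Prod.fst := by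
  simp [PySem.Dict.contains_mk, List.any_eq_true]

theorem pvGetD_mk_mem {ν : Type} (ps : List (String × ν)) (se : String × ν) (d0 : ν)
    (h : se ∈ ps) (hnd : (ps.map Prod.fst).Nodup) :
    (PySem.Dict.mk ps).getD se.1 d0 = se.2 := by
  exact PySem.Dict.getD_of_mem_items (PySem.Dict.mk ps) (by simpa using h) (by simpa [PySem.Dict.keys] using hnd) d0

theorem pvKeyInj {ν : Type} {ps : List (String × ν)} (hnd : (ps.map Prod.fst).Nodup)
    {e e' : String × ν} (he : e ∈ ps) (he' : e' ∈ ps) (h : e.1 = e'.1) : e = e' :=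
  List.inj_on_of_nodup_map hnd he he' h

theorem pvFlatMap_if {α β : Type} (l : List α) (c : α → Bool) (f : α → β) :
    l.flatMap (fun x => if c x then [f x] else []) = (l.filter c).map f := by
  induction l with
  | nil => rfl
  | cons x xs ih => by_cases h : c x <;> simp [h, ih]

def pvStepA (e1 : pvE) (sicd : pvOuterD) (e2 : pvE) : pvOuterD :=
  if pvKeep e1 e2 then
    let owsic : pvInnerD := if sicd.contains e1.1 then sicd.getD e1.1 PySem.Dict.empty else PySem.Dict.empty
    sicd.insert e1.1 (owsic.insert e2.1 (pvPair e1.2 e2.2))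
  else sicd

def pvPush (sicd0 : List (String × pvInnerD)) (w : String) (acc : List (String × List (List Int))) : pvOuterD :=
  if acc.isEmpty then PySem.Dict.mk sicd0 else PySem.Dict.mk (sicd0 ++ [(w, PySem.Dict.mk acc)])

theorem pvPairFoldAux {α β γ : Type} (c : α → Bool) (f : α → β) (g : α → γ) :
    ∀ (l : List α) (a : List β) (b : List γ),
    l.foldl (fun p se => if c se then (p.1 ++ [f se], p.2 ++ [g se]) else p) (a, b)
      = (a ++ (l.filter c).map f, b ++ (l.filter c).map g) := by
  intro l
  induction l with
  | nil => simp
  | cons x xs ih =>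
    intro a b
    by_cases h : c x <;> simp [List.foldl_cons, h, ih]

theorem pvPairFold (s1 s2 : List (String × Int)) (hnd : (s1.map Prod.fst).Nodup) :
    s1.foldl (fun p se =>
        if (PySem.Dict.mk s2).contains se.1 then
          (p.1 ++ [(PySem.Dict.mk s1).getD se.1 0], p.2 ++ [(PySem.Dict.mk s2).getD se.1 0])
        else p) (([] : List Int), ([] : List Int))
      = ((pvCommon s1 s2).map (·.2), (pvCommon s1 s2).map (fun se => (PySem.Dict.mk s2).getD se.1 0)) := by
  rw [pvPairFoldAux]
  unfold pvCommon
  simp only [List.nil_append, Prod.mk.injEq]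
  refine ⟨List.map_congr_left ?_, trivial⟩
  intro se hse
  exact pvGetD_mk_mem s1 se 0 (List.mem_of_mem_filter hse) hnd

theorem pvBodyA (wd : List pvE) (hnd : (wd.map Prod.fst).Nodup)
    (hin : ∀ e ∈ wd, (e.2.map Prod.fst).Nodup)
    (e1 : pvE) (he1 : e1 ∈ wd) (sicd : pvOuterD) (e2 : pvE) (he2 : e2 ∈ wd) :
    (let worker := e1.1
     let sentences : PySem.Dict String Int := PySem.Dict.mk ((PySem.Dict.mk wd).getD worker [])
     let worker2 := e2.1
     if ¬ (worker == worker2) then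
       let sentences2 : PySem.Dict String Int := PySem.Dict.mk ((PySem.Dict.mk wd).getD worker2 [])
       let anns : List Int × List Int :=
         sentences.items.foldl (fun p se =>
           if sentences2.contains se.1 then
             (p.1 ++ [(PySem.Dict.mk ((PySem.Dict.mk wd).getD worker [])).getD se.1 0],
              p.2 ++ [(PySem.Dict.mk ((PySem.Dict.mk wd).getD worker2 [])).getD se.1 0])
           else p) ([], [])
       if anns.1.length > 0 then
         let owsic : pvInnerD :=
           if sicd.contains worker then sicd.getD worker PySem.Dict.empty else PySem.Dict.empty
         sicd.insert worker (owsic.insert worker2 [anns.1, anns.2])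
       else sicd
     else sicd)
    = pvStepA e1 sicd e2 := by
  have h1 : (PySem.Dict.mk wd).getD e1.1 [] = e1.2 := pvGetD_mk_mem wd e1 [] he1 hnd
  have h2 : (PySem.Dict.mk wd).getD e2.1 [] = e2.2 := pvGetD_mk_mem wd e2 [] he2 hnd
  dsimp only
  rw [h1, h2]
  unfold pvStepA pvKeep
  by_cases hne : (e1.1 == e2.1) = true
  · simp [hne]
  · simp only [hne, Bool.not_false, Bool.true_and]
    have hfold := pvPairFold e1.2 e2.2 (hin e1 he1)
    simp only [hfold]
    by_cases hc : (pvCommon e1.2 e2.2).isEmpty = true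
    · have : pvCommon e1.2 e2.2 = [] := by simpa [List.isEmpty_iff] using hc
      simp [this]
    · simp [hc, pvPair]
      intro hnil
      exact absurd (by simp [hnil] : (pvCommon e1.2 e2.2).isEmpty = true) hc

theorem pvInsertFresh {ν : Type} (xs : List (String × ν)) (k : String) (v : ν)
    (h : k ∉ xs.map Prod.fst) :
    (PySem.Dict.mk xs).insert k v = PySem.Dict.mk (xs ++ [(k, v)]) := by
  apply PySem.Dict.ext
  rw [PySem.Dict.items_insert_of_not_contains _ _
    (by rw [Bool.eq_false_iff]; intro hc; exact h ((pvContains_mk xs k).mp hc))]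

theorem pvInsertLast {ν : Type} (xs : List (String × ν)) (k : String) (v w : ν)
    (h : k ∉ xs.map Prod.fst) :
    (PySem.Dict.mk (xs ++ [(k, v)])).insert k w = PySem.Dict.mk (xs ++ [(k, w)]) := by
  apply PySem.Dict.ext
  rw [PySem.Dict.items_insert_of_contains _ _ (by rw [pvContains_mk]; simp)]
  show (xs ++ [(k, v)]).map _ = _
  rw [List.map_append]
  congr 1
  · calc xs.map (fun p => if (p.1 == k) = true then (k, w) else p)
        = xs.map id := List.map_congr_left (by
          intro p hp
          have hk : ¬ (p.1 == k) = true := by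
            simp only [beq_iff_eq]; intro he; exact h (he ▸ List.mem_map_of_mem hp)
          simp [hk])
      _ = xs := List.map_id xs
  · simp

theorem pvPushStep (e1 : pvE) (sicd0 : List (String × pvInnerD))
    (hnd0 : (sicd0.map Prod.fst).Nodup) (hw : e1.1 ∉ sicd0.map Prod.fst)
    (e : pvE) (hk : pvKeep e1 e = true)
    (acc : List (String × List (List Int))) (hde : e.1 ∉ acc.map Prod.fst) :
    pvStepA e1 (pvPush sicd0 e1.1 acc) e = pvPush sicd0 e1.1 (acc ++ [(e.1, pvPair e1.2 e.2)]) := by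
  unfold pvStepA
  rw [if_pos hk]
  cases acc with
  | nil =>
    have hc : (PySem.Dict.mk sicd0).contains e1.1 = false := by
      rw [Bool.eq_false_iff]; intro hc; exact hw ((pvContains_mk sicd0 e1.1).mp hc)
    unfold pvPush
    simp only [List.isEmpty_nil, if_pos, List.nil_append, List.isEmpty_cons]
    rw [hc]
    simp only [Bool.false_eq_true, if_false]
    have h1 : (PySem.Dict.empty : pvInnerD).insert e.1 (pvPair e1.2 e.2)
        = PySem.Dict.mk [(e.1, pvPair e1.2 e.2)] := pvInsertFresh [] e.1 _ (by simp)
    rw [h1, pvInsertFresh sicd0 e1.1 _ hw]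
  | cons a as =>
    have hmem : (e1.1, PySem.Dict.mk (a :: as)) ∈ sicd0 ++ [(e1.1, PySem.Dict.mk (a :: as))] := by simp
    have hnd1 : ((sicd0 ++ [(e1.1, PySem.Dict.mk (a :: as))]).map Prod.fst).Nodup := by
      rw [List.map_append, List.nodup_append]
      refine ⟨hnd0, by simp, ?_⟩
      intro a ha b hb
      simp only [List.map_cons, List.map_nil, List.mem_singleton] at hb
      subst hb; intro he; exact hw (he ▸ ha)
    have hc : (PySem.Dict.mk (sicd0 ++ [(e1.1, PySem.Dict.mk (a :: as))])).contains e1.1 = true := by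
      rw [pvContains_mk]; simp
    unfold pvPush
    simp only [List.isEmpty_cons, List.cons_append, if_false, Bool.false_eq_true]
    rw [hc]
    simp only [if_true]
    rw [pvGetD_mk_mem _ (e1.1, PySem.Dict.mk (a :: as)) _ hmem hnd1]
    rw [pvInsertFresh (a :: as) e.1 _ hde]
    rw [pvInsertLast sicd0 e1.1 _ _ hw]
    simp

theorem pvInnerA (e1 : pvE) (sicd0 : List (String × pvInnerD))
    (hnd0 : (sicd0.map Prod.fst).Nodup) (hw : e1.1 ∉ sicd0.map Prod.fst) :
    ∀ (l : List pvE), (l.map Prod.fst).Nodup →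
      ∀ (acc : List (String × List (List Int))), (∀ e ∈ l, e.1 ∉ acc.map Prod.fst) →
      l.foldl (pvStepA e1) (pvPush sicd0 e1.1 acc)
        = pvPush sicd0 e1.1 (acc ++ (l.filter (pvKeep e1)).map (fun e2 => (e2.1, pvPair e1.2 e2.2))) := by
  intro l
  induction l with
  | nil => intro _ acc _; simp
  | cons e t ih =>
    intro hnd acc hdisj
    rw [List.foldl_cons]
    by_cases hk : pvKeep e1 e = true
    · rw [pvPushStep e1 sicd0 hnd0 hw e hk acc (hdisj e (by simp))]
      rw [ih (by simpa using hnd.of_cons) (acc ++ [(e.1, pvPair e1.2 e.2)]) ?hd]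
      · rw [List.filter_cons_of_pos hk]
        simp
      case hd =>
        intro e' he'
        simp only [List.map_append, List.mem_append]
        rintro (h1 | h2)
        · exact hdisj e' (by simp [he']) h1
        · simp only [List.map_cons, List.map_nil, List.mem_singleton] at h2
          have := List.nodup_cons.mp hnd
          exact this.1 (h2 ▸ List.mem_map_of_mem he')
    · have : pvStepA e1 (pvPush sicd0 e1.1 acc) e = pvPush sicd0 e1.1 acc := by
        unfold pvStepA; rw [if_neg hk]
      rw [this, ih (by simpa using hnd.of_cons) acc (fun e' he' => hdisj e' (by simp [he']))]
      rw [List.filter_cons_of_neg (by simpa using hk)]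

theorem pvOuterA (wd : List pvE) (hnd : (wd.map Prod.fst).Nodup) :
    ∀ (l : List pvE), (l.map Prod.fst).Nodup →
      ∀ (sicd0 : List (String × pvInnerD)), (sicd0.map Prod.fst).Nodup →
        (∀ e ∈ l, e.1 ∉ sicd0.map Prod.fst) →
      l.foldl (fun sicd e1 => wd.foldl (pvStepA e1) sicd) (PySem.Dict.mk sicd0)
        = PySem.Dict.mk (sicd0 ++ (l.filter (fun e1 => !(pvInner wd e1).isEmpty)).map
            (fun e1 => (e1.1, PySem.Dict.mk (pvInner wd e1)))) := by
  intro l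
  induction l with
  | nil => intro _ sicd0 _ _; simp
  | cons e1 t ih =>
    intro hndl sicd0 hnd0 hdisj
    rw [List.foldl_cons]
    have hstart : (PySem.Dict.mk sicd0 : pvOuterD) = pvPush sicd0 e1.1 [] := by
      unfold pvPush; simp
    have hinner := pvInnerA e1 sicd0 hnd0 (hdisj e1 (by simp)) wd hnd []
      (by intro e _; simp)
    rw [hstart, hinner]
    by_cases hemp : (pvInner wd e1).isEmpty = true
    · have h0 : pvPush sicd0 e1.1 ([] ++ (wd.filter (pvKeep e1)).map
          (fun e2 => (e2.1, pvPair e1.2 e2.2))) = PySem.Dict.mk sicd0 := by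
        unfold pvPush
        rw [if_pos (by simpa [pvInner] using hemp)]
      rw [h0, ih (by simpa using hndl.of_cons) sicd0 hnd0
        (fun e he => hdisj e (by simp [he]))]
      rw [List.filter_cons_of_neg (by simpa using hemp)]
    · have h0 : pvPush sicd0 e1.1 ([] ++ (wd.filter (pvKeep e1)).map
          (fun e2 => (e2.1, pvPair e1.2 e2.2)))
          = PySem.Dict.mk (sicd0 ++ [(e1.1, PySem.Dict.mk (pvInner wd e1))]) := by
        unfold pvPush
        rw [if_neg (by simpa [pvInner] using hemp)]
        rfl
      rw [h0]
      have hnd0' : ((sicd0 ++ [(e1.1, PySem.Dict.mk (pvInner wd e1))]).map Prod.fst).Nodup := by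
        rw [List.map_append, List.nodup_append]
        refine ⟨hnd0, by simp, ?_⟩
        intro a ha b hb
        simp only [List.map_cons, List.map_nil, List.mem_singleton] at hb
        subst hb; intro he; exact (hdisj e1 (by simp)) (he ▸ ha)
      have hdisj' : ∀ e ∈ t, e.1 ∉ (sicd0 ++ [(e1.1, PySem.Dict.mk (pvInner wd e1))]).map Prod.fst := by
        intro e he
        rw [List.map_append, List.mem_append]
        rintro (h1 | h2)
        · exact hdisj e (by simp [he]) h1
        · simp only [List.map_cons, List.map_nil, List.mem_singleton] at h2
          exact (List.nodup_cons.mp hndl).1 (h2 ▸ List.mem_map_of_mem he)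
      rw [ih (by simpa using hndl.of_cons) _ hnd0' hdisj']
      rw [List.filter_cons_of_pos (by simpa using hemp)]
      simp

theorem pvA_eq (wd : List pvE) (hnd : (wd.map Prod.fst).Nodup)
    (hin : ∀ e ∈ wd, (e.2.map Prod.fst).Nodup) :
    get_sentences_in_common wd = pvOutL wd wd := by
  unfold get_sentences_in_common
  dsimp only
  rw [PySem.List.foldl_congr_mem wd _ (fun sicd e1 => wd.foldl (pvStepA e1) sicd) _
    (by
      intro sicd e1 he1
      exact PySem.List.foldl_congr_mem wd _ _ _
        (fun sicd' e2 he2 => pvBodyA wd hnd hin e1 he1 sicd' e2 he2))]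
  rw [show (PySem.Dict.empty : pvOuterD) = PySem.Dict.mk [] from rfl]
  rw [pvOuterA wd hnd wd hnd [] (by simp) (by simp)]
  simp [pvOutL, List.map_map]

def pvFlat (l : List pvE) (s : String) : List (String × Int) :=
  l.flatMap (fun e => (e.2.filter (fun se => se.1 == s)).map (fun se => (e.1, se.2)))

theorem pvFlat_cons (e : pvE) (t : List pvE) (s : String) :
    pvFlat (e :: t) s = (e.2.filter (fun se => se.1 == s)).map (fun se => (e.1, se.2)) ++ pvFlat t s := by
  simp [pvFlat]

theorem pvIndex_getD (l : List pvE) (d : PySem.Dict String (List (String × Int))) (s : String) :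
    (l.foldl (fun idx e =>
        e.2.foldl (fun idx se => idx.modify se.1 [] (· ++ [(e.1, se.2)])) idx) d).getD s []
      = d.getD s [] ++ pvFlat l s := by
  induction l generalizing d with
  | nil => simp [pvFlat]
  | cons e t ih =>
    rw [List.foldl_cons, ih]
    have hstep : (e.2.foldl (fun idx se => idx.modify se.1 [] (· ++ [(e.1, se.2)])) d).getD s []
        = d.getD s [] ++ (e.2.filter (fun se => se.1 == s)).map (fun se => (e.1, se.2)) := by
      have := PySem.Dict.getD_foldl_modify_append (e.2.map (fun se => (se.1, (e.1, se.2)))) d s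
      rw [List.foldl_map] at this
      rw [this, List.filter_map, List.map_map]
      rfl
    rw [hstep]
    simp [pvFlat, List.flatMap_cons]

theorem pvFlat_mem (l : List pvE) (s : String) (wv : String × Int) :
    wv ∈ pvFlat l s ↔ ∃ e ∈ l, ∃ se ∈ e.2, se.1 = s ∧ wv = (e.1, se.2) := by
  simp only [pvFlat, List.mem_flatMap, List.mem_map, List.mem_filter, beq_iff_eq]
  constructor
  · rintro ⟨e, he, se, ⟨hse, hq⟩, hw⟩
    exact ⟨e, he, se, hse, hq, hw.symm⟩
  · rintro ⟨e, he, se, hse, hq, hw⟩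
    exact ⟨e, he, se, ⟨hse, hq⟩, hw.symm⟩

theorem pvFlat_filter_nil (l : List pvE) (s : String) (w2 : String) (h : w2 ∉ l.map Prod.fst) :
    (pvFlat l s).filter (fun wv => wv.1 == w2) = [] := by
  rw [List.filter_eq_nil_iff]
  intro wv hwv
  obtain ⟨e, he, se, _, _, hw⟩ := (pvFlat_mem l s wv).mp hwv
  subst hw
  simp only [beq_iff_eq]
  intro heq
  exact h (heq ▸ List.mem_map_of_mem he)

theorem pvFlat_filter_mem (l : List pvE) (hnd : (l.map Prod.fst).Nodup) (e2 : pvE) (he2 : e2 ∈ l)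
    (s : String) :
    (pvFlat l s).filter (fun wv => wv.1 == e2.1)
      = (e2.2.filter (fun se => se.1 == s)).map (fun se => (e2.1, se.2)) := by
  induction l with
  | nil => cases he2
  | cons e t ih =>
    rw [pvFlat_cons, List.filter_append]
    rcases List.mem_cons.mp he2 with h | h
    · subst h
      have h1 : ((e2.2.filter (fun se => se.1 == s)).map (fun se => (e2.1, se.2))).filter
          (fun wv => wv.1 == e2.1) = (e2.2.filter (fun se => se.1 == s)).map (fun se => (e2.1, se.2)) := by
        rw [List.filter_eq_self]
        intro wv hwv
        obtain ⟨se, _, hw⟩ := List.mem_map.mp hwv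
        simp [← hw]
      have h2 : (pvFlat t s).filter (fun wv => wv.1 == e2.1) = [] := by
        apply pvFlat_filter_nil
        exact (List.nodup_cons.mp hnd).1
      rw [h1, h2, List.append_nil]
    · have hne : ¬ e.1 = e2.1 := by
        intro heq
        exact (List.nodup_cons.mp hnd).1 (heq ▸ List.mem_map_of_mem h)
      have h1 : ((e.2.filter (fun se => se.1 == s)).map (fun se => (e.1, se.2))).filter
          (fun wv => wv.1 == e2.1) = [] := by
        rw [List.filter_eq_nil_iff]
        intro wv hwv
        obtain ⟨se, _, hw⟩ := List.mem_map.mp hwv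
        simp [← hw, hne]
      rw [h1, List.nil_append]
      exact ih (List.nodup_cons.mp hnd).2 h

theorem pvSentStep_rw (wd : List pvE) (w1 : String) (v1 : Int) (s : String)
    (pl : PySem.Dict String (List (Int × Int))) :
    (pvFlat wd s).foldl (fun pl wv =>
        if wv.1 == w1 then pl else pl.modify wv.1 [] (· ++ [(v1, wv.2)])) pl
      = (((pvFlat wd s).filter (fun wv => !(wv.1 == w1))).map (fun wv => (wv.1, (v1, wv.2)))).foldl
          (fun d p => d.modify p.1 [] (· ++ [p.2])) pl := by
  rw [List.foldl_map, List.foldl_filter]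
  apply PySem.List.foldl_congr_mem
  intro acc x _
  by_cases h : (x.1 == w1) = true <;> simp [h]

theorem pvSentStep_getD (wd : List pvE) (w1 : String) (v1 : Int) (s : String)
    (pl : PySem.Dict String (List (Int × Int))) (w2 : String) :
    ((pvFlat wd s).foldl (fun pl wv =>
        if wv.1 == w1 then pl else pl.modify wv.1 [] (· ++ [(v1, wv.2)])) pl).getD w2 []
      = pl.getD w2 [] ++ (if w2 == w1 then [] else
          ((pvFlat wd s).filter (fun wv => wv.1 == w2)).map (fun wv => (v1, wv.2))) := by
  rw [pvSentStep_rw, PySem.Dict.getD_foldl_modify_append]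
  congr 1
  rw [List.filter_map, List.map_map]
  by_cases hw : (w2 == w1) = true
  · rw [if_pos hw]
    have : ((pvFlat wd s).filter (fun wv => !(wv.1 == w1))).filter
        ((fun p => p.1 == w2) ∘ (fun wv => (wv.1, (v1, wv.2)))) = [] := by
      rw [List.filter_eq_nil_iff]
      intro wv hwv
      have h1 := (List.mem_filter.mp hwv).2
      simp only [Function.comp_apply, beq_iff_eq]
      intro he
      rw [he, (beq_iff_eq.mp hw)] at h1
      simp at h1
    rw [this]; rfl
  · rw [if_neg (by simpa using hw)]
    rw [List.filter_filter]
    have : (pvFlat wd s).filter (fun a => ((fun p => p.1 == w2) ∘ fun wv => (wv.1, (v1, wv.2))) a && !(a.1 == w1))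
        = (pvFlat wd s).filter (fun wv => wv.1 == w2) := by
      apply List.filter_congr
      intro wv _
      by_cases h2 : (wv.1 == w2) = true
      · have : (wv.1 == w1) = false := by
          rw [beq_iff_eq.mp h2]; simpa using hw
        simp [h2, this]
      · simp [h2]
    rw [this]
    rfl

theorem pvSentStep_keys (wd : List pvE) (w1 : String) (v1 : Int) (s : String)
    (pl : PySem.Dict String (List (Int × Int))) :
    ((pvFlat wd s).foldl (fun pl wv =>
        if wv.1 == w1 then pl else pl.modify wv.1 [] (· ++ [(v1, wv.2)])) pl).keys
      = PySem.Set.update pl.keys (((pvFlat wd s).filter (fun wv => !(wv.1 == w1))).map Prod.fst) := by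
  rw [pvSentStep_rw, PySem.Dict.keys_foldl_modify_key]
  rw [List.map_map]
  rfl

def pvPL (wd : List pvE) (e1 : pvE) : PySem.Dict String (List (Int × Int)) :=
  e1.2.foldl (fun pl se =>
    (pvFlat wd se.1).foldl (fun pl wv =>
      if wv.1 == e1.1 then pl else pl.modify wv.1 [] (· ++ [(se.2, wv.2)])) pl) PySem.Dict.empty

theorem pvPL_getD_aux (wd : List pvE) (w1 : String) (w2 : String) :
    ∀ (s1 : List (String × Int)) (pl : PySem.Dict String (List (Int × Int))),
    (s1.foldl (fun pl se =>
        (pvFlat wd se.1).foldl (fun pl wv =>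
          if wv.1 == w1 then pl else pl.modify wv.1 [] (· ++ [(se.2, wv.2)])) pl) pl).getD w2 []
      = pl.getD w2 [] ++ s1.flatMap (fun se => if w2 == w1 then [] else
          ((pvFlat wd se.1).filter (fun wv => wv.1 == w2)).map (fun wv => (se.2, wv.2))) := by
  intro s1
  induction s1 with
  | nil => simp
  | cons se t ih =>
    intro pl
    rw [List.foldl_cons, ih, pvSentStep_getD, List.flatMap_cons, List.append_assoc]

theorem pvPL_getD (wd : List pvE) (e1 : pvE) (w2 : String) :
    (pvPL wd e1).getD w2 []
      = e1.2.flatMap (fun se => if w2 == e1.1 then [] else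
          ((pvFlat wd se.1).filter (fun wv => wv.1 == w2)).map (fun wv => (se.2, wv.2))) := by
  rw [pvPL, pvPL_getD_aux]
  rfl

theorem pvPL_keys_aux (wd : List pvE) (w1 : String) :
    ∀ (s1 : List (String × Int)) (pl : PySem.Dict String (List (Int × Int))),
    (s1.foldl (fun pl se =>
        (pvFlat wd se.1).foldl (fun pl wv =>
          if wv.1 == w1 then pl else pl.modify wv.1 [] (· ++ [(se.2, wv.2)])) pl) pl).keys
      = PySem.Set.update pl.keys (s1.flatMap (fun se =>
          ((pvFlat wd se.1).filter (fun wv => !(wv.1 == w1))).map Prod.fst)) := by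
  intro s1
  induction s1 with
  | nil => simp [PySem.Set.update]
  | cons se t ih =>
    intro pl
    rw [List.foldl_cons, ih, pvSentStep_keys, List.flatMap_cons, PySem.Set.update_append]

theorem pvPL_keys (wd : List pvE) (e1 : pvE) :
    (pvPL wd e1).keys
      = PySem.Set.ofList (e1.2.flatMap (fun se =>
          ((pvFlat wd se.1).filter (fun wv => !(wv.1 == e1.1))).map Prod.fst)) := by
  rw [pvPL, pvPL_keys_aux]
  rw [show (PySem.Dict.empty : PySem.Dict String (List (Int × Int))).keys = [] from rfl]
  exact PySem.Set.update_nil_left _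

theorem pvFilter_key (s2 : List (String × Int)) (hnd : (s2.map Prod.fst).Nodup) (s : String) :
    s2.filter (fun se => se.1 == s)
      = if (PySem.Dict.mk s2).contains s then [(s, (PySem.Dict.mk s2).getD s 0)] else [] := by
  induction s2 with
  | nil => simp
  | cons a t ih =>
    have hnd2 : (a.1 :: t.map Prod.fst).Nodup := by simpa using hnd
    have hnotin : a.1 ∉ t.map Prod.fst := (List.nodup_cons.mp hnd2).1
    have hnd' : (t.map Prod.fst).Nodup := (List.nodup_cons.mp hnd2).2
    by_cases ha : (a.1 == s) = true
    · have has : a.1 = s := beq_iff_eq.mp ha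
      have htf : t.filter (fun se => se.1 == s) = [] := by
        rw [List.filter_eq_nil_iff]
        intro se hse
        simp only [beq_iff_eq]
        intro he
        exact hnotin (by rw [has, ← he]; exact List.mem_map_of_mem hse)
      have hc : (PySem.Dict.mk (a :: t)).contains s = true := by
        rw [pvContains_mk]; simp [has]
      rw [List.filter_cons, if_pos ha, htf, if_pos hc]
      have hg : (PySem.Dict.mk (a :: t)).getD s 0 = a.2 := by
        rw [PySem.Dict.getD_eq_get?_getD, PySem.Dict.get?_mk_cons, if_pos (by simpa using ha)]
        rfl
      rw [hg, ← has]
    · rw [List.filter_cons, if_neg (by simpa using ha), ih hnd']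
      have hcc : (PySem.Dict.mk (a :: t)).contains s = (PySem.Dict.mk t).contains s := by
        by_cases h : (PySem.Dict.mk t).contains s = true
        · rw [h, pvContains_mk]
          right
          exact (pvContains_mk t s).mp h
        · rw [Bool.eq_false_iff.mpr h, ← Bool.not_eq_true, pvContains_mk]
          intro hmem
          rcases (by simpa using hmem : s = a.1 ∨ s ∈ t.map Prod.fst) with h1 | h2
          · exact absurd (beq_iff_eq.mpr h1.symm) (by simpa using ha)
          · exact h ((pvContains_mk t s).mpr h2)
      have hgd : (PySem.Dict.mk (a :: t)).getD s 0 = (PySem.Dict.mk t).getD s 0 := by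
        rw [PySem.Dict.getD_eq_get?_getD, PySem.Dict.get?_mk_cons,
          if_neg (by simpa using ha), ← PySem.Dict.getD_eq_get?_getD]
      rw [hcc, hgd]

theorem pvCommon_ne_nil_iff (s1 s2 : List (String × Int)) :
    (¬ (pvCommon s1 s2).isEmpty = true) ↔ ∃ se ∈ s1, (PySem.Dict.mk s2).contains se.1 = true := by
  rw [List.isEmpty_iff, pvCommon]
  constructor
  · intro h
    by_contra hc
    push Not at hc
    exact h (List.filter_eq_nil_iff.mpr (by
      intro se hse
      simpa using hc se hse))
  · rintro ⟨se, hse, hp⟩ h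
    rw [List.filter_eq_nil_iff] at h
    exact (h se hse) hp

theorem pvPL_getD_mem (wd : List pvE) (hnd : (wd.map Prod.fst).Nodup)
    (hin : ∀ e ∈ wd, (e.2.map Prod.fst).Nodup)
    (e1 : pvE) (e2 : pvE) (he2 : e2 ∈ wd) (hne : ¬ (e1.1 == e2.1) = true) :
    (pvPL wd e1).getD e2.1 []
      = (pvCommon e1.2 e2.2).map (fun se => (se.2, (PySem.Dict.mk e2.2).getD se.1 0)) := by
  rw [pvPL_getD]
  have hne' : (e2.1 == e1.1) = false := by
    rw [Bool.eq_false_iff]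
    intro h
    exact hne (beq_iff_eq.mpr (beq_iff_eq.mp h).symm)
  have hfun : (fun se : String × Int => if (e2.1 == e1.1) = true then ([] : List (Int × Int)) else
        ((pvFlat wd se.1).filter (fun wv => wv.1 == e2.1)).map (fun wv => (se.2, wv.2)))
      = fun se => if (PySem.Dict.mk e2.2).contains se.1 then
          [(se.2, (PySem.Dict.mk e2.2).getD se.1 0)] else [] := by
    funext se
    rw [if_neg (by simp [hne'])]
    rw [pvFlat_filter_mem wd hnd e2 he2 se.1, pvFilter_key e2.2 (hin e2 he2) se.1]
    by_cases hc : (PySem.Dict.mk e2.2).contains se.1 = true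
    · rw [if_pos hc, if_pos hc]; rfl
    · rw [if_neg hc, if_neg hc]; rfl
  rw [hfun, pvFlatMap_if]
  rfl

def pvBig (wd : List pvE) (e1 : pvE) : List String :=
  e1.2.flatMap (fun se => ((pvFlat wd se.1).filter (fun wv => !(wv.1 == e1.1))).map Prod.fst)

theorem pvBig_mem (wd : List pvE) (e1 : pvE) (w2 : String) :
    w2 ∈ pvBig wd e1 ↔ ∃ e2 ∈ wd, e2.1 = w2 ∧ pvKeep e1 e2 = true := by
  unfold pvBig
  simp only [List.mem_flatMap, List.mem_map, List.mem_filter]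
  constructor
  · rintro ⟨se, hse, wv, ⟨hwv, hnw1⟩, hw2⟩
    obtain ⟨e, he, se', hse', hs, hwe⟩ := (pvFlat_mem wd se.1 wv).mp hwv
    refine ⟨e, he, by rw [← hw2, hwe], ?_⟩
    unfold pvKeep
    have h1 : ¬ (e1.1 == e.1) = true := by
      intro h
      rw [hwe] at hnw1
      simp only [Bool.not_eq_true'] at hnw1
      rw [beq_iff_eq.mp h] at hnw1
      simp at hnw1
    have h2 : ¬ (pvCommon e1.2 e.2).isEmpty = true := by
      rw [pvCommon_ne_nil_iff]
      exact ⟨se, hse, (pvContains_mk e.2 se.1).mpr (hs ▸ List.mem_map_of_mem hse')⟩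
    simp only [Bool.and_eq_true, Bool.not_eq_true']
    exact ⟨by simpa using h1, by simpa using h2⟩
  · rintro ⟨e2, he2, hw2, hk⟩
    unfold pvKeep at hk
    simp only [Bool.and_eq_true, Bool.not_eq_true'] at hk
    obtain ⟨hne, hcom⟩ := hk
    have : ¬ (pvCommon e1.2 e2.2).isEmpty = true := by simp [hcom]
    obtain ⟨se, hse, hc⟩ := (pvCommon_ne_nil_iff e1.2 e2.2).mp this
    obtain ⟨se', hse', hs⟩ : ∃ se' ∈ e2.2, se'.1 = se.1 := by
      have := (pvContains_mk e2.2 se.1).mp hc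
      obtain ⟨se', hse', he⟩ := List.mem_map.mp this
      exact ⟨se', hse', he⟩
    refine ⟨se, hse, (e2.1, se'.2), ⟨?_, ?_⟩, hw2⟩
    · exact (pvFlat_mem wd se.1 (e2.1, se'.2)).mpr ⟨e2, he2, se', hse', hs, rfl⟩
    · simp only [Bool.not_eq_true']
      rw [Bool.eq_false_iff]
      intro h
      rw [beq_iff_eq.mp h] at hne
      simp at hne

theorem pvPL_contains (wd : List pvE) (hnd : (wd.map Prod.fst).Nodup)
    (e1 : pvE) (e2 : pvE) (he2 : e2 ∈ wd) :
    ((pvPL wd e1).contains e2.1 = true) ↔ pvKeep e1 e2 = true := by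
  rw [PySem.Dict.contains_iff_mem_keys, pvPL_keys, PySem.Set.mem_ofList]
  rw [show (e1.2.flatMap (fun se => ((pvFlat wd se.1).filter (fun wv => !(wv.1 == e1.1))).map Prod.fst)) = pvBig wd e1 from rfl]
  rw [pvBig_mem wd e1 e2.1]
  constructor
  · rintro ⟨e, he, hw, hk⟩
    rwa [pvKeyInj hnd he he2 hw] at hk
  · intro hk
    exact ⟨e2, he2, rfl, hk⟩

theorem pvPL_empty_iff (wd : List pvE) (e1 : pvE) :
    ((pvPL wd e1).items.isEmpty = true) ↔ pvInner wd e1 = [] := by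
  have hkeys : (pvPL wd e1).items.isEmpty = true ↔ (pvPL wd e1).keys = [] := by
    rw [List.isEmpty_iff]
    constructor
    · intro h; rw [show (pvPL wd e1).keys = (pvPL wd e1).items.map Prod.fst from rfl, h]; rfl
    · intro h
      have := congrArg List.length h
      rw [show (pvPL wd e1).keys = (pvPL wd e1).items.map Prod.fst from rfl] at this
      simpa using List.length_eq_zero_iff.mp (by simpa using this)
  rw [hkeys, pvPL_keys]
  rw [show (e1.2.flatMap (fun se => ((pvFlat wd se.1).filter (fun wv => !(wv.1 == e1.1))).map Prod.fst)) = pvBig wd e1 from rfl]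
  have hset : PySem.Set.ofList (pvBig wd e1) = [] ↔ pvBig wd e1 = [] := by
    constructor
    · intro h
      rw [List.eq_nil_iff_forall_not_mem]
      intro x hx
      have : x ∈ PySem.Set.ofList (pvBig wd e1) := (PySem.Set.mem_ofList _ _).mpr hx
      rw [h] at this
      cases this
    · intro h; rw [h]; rfl
  rw [hset]
  unfold pvInner
  constructor
  · intro h
    rw [List.map_eq_nil_iff, List.filter_eq_nil_iff]
    intro e2 he2
    rw [Bool.not_eq_true]
    by_contra hk
    rw [Bool.not_eq_false] at hk
    have : e2.1 ∈ pvBig wd e1 := (pvBig_mem wd e1 e2.1).mpr ⟨e2, he2, rfl, hk⟩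
    rw [h] at this
    cases this
  · intro h
    rw [List.map_eq_nil_iff, List.filter_eq_nil_iff] at h
    rw [List.eq_nil_iff_forall_not_mem]
    intro w2 hw2
    obtain ⟨e2, he2, _, hk⟩ := (pvBig_mem wd e1 w2).mp hw2
    exact (h e2 he2) hk

theorem pvEmit (wd : List pvE) (hnd : (wd.map Prod.fst).Nodup)
    (hin : ∀ e ∈ wd, (e.2.map Prod.fst).Nodup) (e1 : pvE) :
    (wd.filter (fun e2 => (pvPL wd e1).contains e2.1)).map
        (fun e2 => (e2.1, [((pvPL wd e1).getD e2.1 []).map (·.1),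
                           ((pvPL wd e1).getD e2.1 []).map (·.2)]))
      = pvInner wd e1 := by
  unfold pvInner
  have hfilt : wd.filter (fun e2 => (pvPL wd e1).contains e2.1) = wd.filter (pvKeep e1) :=
    List.filter_congr (fun e2 he2 => by
      by_cases hk : pvKeep e1 e2 = true
      · rw [hk]; exact (pvPL_contains wd hnd e1 e2 he2).mpr hk
      · rw [Bool.eq_false_iff.mpr hk]
        exact Bool.eq_false_iff.mpr (fun hc => hk ((pvPL_contains wd hnd e1 e2 he2).mp hc)))
  rw [hfilt]
  apply List.map_congr_left
  intro e2 he2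
  have hmem := List.mem_filter.mp he2
  have hk := hmem.2
  have hne : ¬ (e1.1 == e2.1) = true := by
    unfold pvKeep at hk
    simp only [Bool.and_eq_true, Bool.not_eq_true'] at hk
    simp [hk.1]
  rw [pvPL_getD_mem wd hnd hin e1 e2 hmem.1 hne]
  rw [List.map_map, List.map_map]
  rfl

theorem pvOuterB (wd : List pvE) (hnd : (wd.map Prod.fst).Nodup)
    (hin : ∀ e ∈ wd, (e.2.map Prod.fst).Nodup) :
    ∀ (l : List pvE), (l.map Prod.fst).Nodup →
      ∀ (res0 : List (String × List (String × List (List Int)))),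
        (∀ e ∈ l, e.1 ∉ res0.map Prod.fst) →
      l.foldl (fun res e1 =>
          if (pvPL wd e1).items.isEmpty then res
          else res.insert e1.1 ((wd.filter (fun e2 => (pvPL wd e1).contains e2.1)).map
            (fun e2 => (e2.1, [((pvPL wd e1).getD e2.1 []).map (·.1),
                               ((pvPL wd e1).getD e2.1 []).map (·.2)]))))
        (PySem.Dict.mk res0)
        = PySem.Dict.mk (res0 ++ pvOutL wd l) := by
  intro l
  induction l with
  | nil => intro _ res0 _; simp [pvOutL]
  | cons e1 t ih =>
    intro hndl res0 hdisj
    rw [List.foldl_cons]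
    by_cases hemp : (pvPL wd e1).items.isEmpty = true
    · rw [if_pos hemp, ih (by simpa using hndl.of_cons) res0 (fun e he => hdisj e (by simp [he]))]
      have hn : pvInner wd e1 = [] := (pvPL_empty_iff wd e1).mp hemp
      have : pvOutL wd (e1 :: t) = pvOutL wd t := by
        unfold pvOutL
        rw [List.filter_cons, if_neg (by simp [hn])]
      rw [this]
    · rw [if_neg hemp, pvEmit wd hnd hin e1]
      rw [pvInsertFresh res0 e1.1 _ (hdisj e1 (by simp))]
      rw [ih (by simpa using hndl.of_cons) (res0 ++ [(e1.1, pvInner wd e1)]) ?hd]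
      · have hne : ¬ pvInner wd e1 = [] := fun h => hemp ((pvPL_empty_iff wd e1).mpr h)
        have : pvOutL wd (e1 :: t) = (e1.1, pvInner wd e1) :: pvOutL wd t := by
          unfold pvOutL
          rw [List.filter_cons, if_pos (by simpa [List.isEmpty_iff] using hne)]
          rfl
        rw [this]
        simp
      case hd =>
        intro e he
        rw [List.map_append, List.mem_append]
        rintro (h1 | h2)
        · exact hdisj e (by simp [he]) h1
        · simp only [List.map_cons, List.map_nil, List.mem_singleton] at h2
          exact (List.nodup_cons.mp hndl).1 (h2 ▸ List.mem_map_of_mem he)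

theorem pvB_eq (wd : List pvE) (hnd : (wd.map Prod.fst).Nodup)
    (hin : ∀ e ∈ wd, (e.2.map Prod.fst).Nodup) :
    get_sentences_in_common_alt wd = pvOutL wd wd := by
  unfold get_sentences_in_common_alt
  dsimp only
  have hidx : ∀ s, (wd.foldl (fun idx e =>
      e.2.foldl (fun idx se => idx.modify se.1 [] (· ++ [(e.1, se.2)])) idx)
      (PySem.Dict.empty : PySem.Dict String (List (String × Int)))).getD s [] = pvFlat wd s := by
    intro s
    rw [pvIndex_getD]
    rfl
  rw [PySem.List.foldl_congr_mem wd _ (fun res e1 =>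
      if (pvPL wd e1).items.isEmpty then res
      else res.insert e1.1 ((wd.filter (fun e2 => (pvPL wd e1).contains e2.1)).map
        (fun e2 => (e2.1, [((pvPL wd e1).getD e2.1 []).map (·.1),
                           ((pvPL wd e1).getD e2.1 []).map (·.2)])))) _
    (by
      intro res e1 _
      have hpl : (e1.2.foldl (fun pl se =>
          ((wd.foldl (fun idx e =>
            e.2.foldl (fun idx se => idx.modify se.1 [] (· ++ [(e.1, se.2)])) idx)
            (PySem.Dict.empty : PySem.Dict String (List (String × Int)))).getD se.1 []).foldl
              (fun pl wv => if wv.1 == e1.1 then pl else pl.modify wv.1 [] (· ++ [(se.2, wv.2)])) pl)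
          PySem.Dict.empty) = pvPL wd e1 := by
        unfold pvPL
        apply PySem.List.foldl_congr_mem
        intro pl se _
        rw [hidx se.1]
      rw [hpl])]
  rw [show (PySem.Dict.empty : PySem.Dict String (List (String × List (List Int)))) = PySem.Dict.mk [] from rfl]
  rw [pvOuterB wd hnd hin wd hnd [] (by simp)]
  rfl

-- ===== VERDICT (by name: the statement is the Claim_ definition above) =====
theorem get_sentences_in_common_spec : Claim_equal_get_sentences_in_common := by
  intro wd _ hpre
  unfold Spec_get_sentences_in_common
  rw [pvA_eq wd hpre.1 hpre.2, pvB_eq wd hpre.1 hpre.2]
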